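-- pv_equiv track=rewrite | github.com/thepratholic/Competitive-Programming | LeetCode/Weekly Contest 498/Smallest Stable Index II.py | firstStableIndex
-- ===== SOURCE A (Python) =====
-- def firstStableIndex(nums: list[int], k: int) -> int:
--     n = len(nums)
--
--     pref = [0] * n
--     suff = [0] * n
--
--     pref[0] = nums[0]
--
--     for i in range(1, n):
--         pref[i] = max(pref[i - 1], nums[i])
--
--     suff[-1] = nums[-1]
--     for i in range(n - 2, -1, -1):
--         suff[i] = min(suff[i + 1], nums[i])
--
--     for idx in range(n):
--         mx = pref[idx]
--         mn = suff[idx]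
--
--         if mx - mn <= k:
--             return idx
--
--     return -1
-- ===== SOURCE B (Python) =====
-- def firstStableIndex(nums: list[int], k: int) -> int:
--     for idx in range(len(nums)):
--         if max(nums[:idx + 1]) - min(nums[idx:]) <= k:
--             return idx
--     return -1
-- ===== Notes on version B (the rewrite author's own statement) =====
-- stated objective: simpler
-- what changed: B drops A's two precomputed prefix-max/suffix-min tables entirely and recomputes max(nums[:idx+1]) - min(nums[idx:]) directly from slices at each index (the direct transcription of the task statement, no auxiliary arrays).
import Mathlib
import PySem

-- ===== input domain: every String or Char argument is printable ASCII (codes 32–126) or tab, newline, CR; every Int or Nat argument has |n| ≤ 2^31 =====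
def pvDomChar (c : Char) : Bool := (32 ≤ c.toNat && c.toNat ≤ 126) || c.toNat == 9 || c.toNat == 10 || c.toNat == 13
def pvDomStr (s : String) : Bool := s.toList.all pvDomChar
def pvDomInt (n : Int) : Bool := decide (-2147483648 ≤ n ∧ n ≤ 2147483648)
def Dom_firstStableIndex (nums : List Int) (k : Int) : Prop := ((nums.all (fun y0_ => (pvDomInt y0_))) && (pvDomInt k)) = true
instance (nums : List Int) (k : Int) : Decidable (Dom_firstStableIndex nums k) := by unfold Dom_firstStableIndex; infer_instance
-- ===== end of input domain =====

-- B drops A's two precomputed prefix-max/suffix-min tables and recomputes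
-- max(nums[:idx+1]) - min(nums[idx:]) directly from slices at each index
-- (objective: simpler — a direct transcription of the task, no auxiliary arrays; not faster).


-- ===== PORT A =====
-- A's final scan: 'for idx in range(n): … if mx - mn <= k: return idx'
def aScan (pref suff : List Int) (k : Int) : List Int → Int
  | [] => -1
  | idx :: rest =>
    let mx := PySem.List.pyGetD pref idx 0
    let mn := PySem.List.pyGetD suff idx 0
    if mx - mn ≤ k then idx else aScan pref suff k rest

def firstStableIndex (nums : List Int) (k : Int) : Int :=
  let n : Int := nums.length
  let pref0 : List Int := List.replicate nums.length 0
  let suff0 : List Int := List.replicate nums.length 0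
  let pref1 := PySem.List.pySetD pref0 0 (PySem.List.pyGetD nums 0 0)
  let pref := (PySem.List.pyRange 1 n 1).foldl
      (fun p i => PySem.List.pySetD p i
        (max (PySem.List.pyGetD p (i - 1) 0) (PySem.List.pyGetD nums i 0))) pref1
  let suff1 := PySem.List.pySetD suff0 (-1) (PySem.List.pyGetD nums (-1) 0)
  let suff := (PySem.List.pyRange (n - 2) (-1) (-1)).foldl
      (fun s i => PySem.List.pySetD s i
        (min (PySem.List.pyGetD s (i + 1) 0) (PySem.List.pyGetD nums i 0))) suff1
  aScan pref suff k (PySem.List.pyRange 0 n 1)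

-- ===== PORT B =====
-- B's loop: 'for idx in range(len(nums)): if max(nums[:idx+1]) - min(nums[idx:]) <= k: return idx'
-- max()/min() of a slice via PySem.List.max?/min?; the none branches are Python's ValueError on an
-- empty slice, unreachable for 0 ≤ idx < len(nums).
def bScan (nums : List Int) (k : Int) : List Int → Int
  | [] => -1
  | idx :: rest =>
    match PySem.List.max? (PySem.List.slice nums none (some (idx + 1))) (fun y => y),
          PySem.List.min? (PySem.List.slice nums (some idx) none) (fun y => y) with
    | some mx, some mn => if mx - mn ≤ k then idx else bScan nums k rest
    | _, _ => -1

def firstStableIndex_alt (nums : List Int) (k : Int) : Int :=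
  bScan nums k (PySem.List.pyRange 0 nums.length 1)

-- ===== PRECONDITION & SPEC =====
-- Pre_ excludes only the empty list, on which the Python A raises IndexError (at nums[0]).
def Pre_firstStableIndex (nums : List Int) (k : Int) : Prop := nums ≠ []
instance (nums : List Int) (k : Int) : Decidable (Pre_firstStableIndex nums k) := by
  unfold Pre_firstStableIndex; infer_instance

def pvWitness_firstStableIndex : List Int × Int := ([3, -1, 4, 1], 2)

def Spec_firstStableIndex (nums : List Int) (k : Int) (out : Int) : Prop := out = firstStableIndex_alt nums k
instance (nums : List Int) (k : Int) (out : Int) : Decidable (Spec_firstStableIndex nums k out) := by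
  unfold Spec_firstStableIndex; infer_instance

-- ===== CLAIM (what is proved, stated in full; the proofs are below) =====
def Claim_equal_firstStableIndex : Prop := ∀ (nums : List Int) (k : Int), Dom_firstStableIndex nums k → Pre_firstStableIndex nums k → Spec_firstStableIndex nums k (firstStableIndex nums k)
-- ===== LEMMAS AND PROOFS =====

-- reference suffix-minimum list: (sm nums)[i] = min(nums[i:])
def sm : List Int → List Int
  | [] => []
  | x :: xs =>
    match sm xs with
    | [] => [x]
    | m :: ms => min x m :: m :: ms

theorem sm_length (xs : List Int) : (sm xs).length = xs.length := by
  induction xs with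
  | nil => rfl
  | cons x xs ih =>
    cases h : sm xs with
    | nil => simp [sm, h]; simpa [h] using ih.symm
    | cons m ms => simp [sm, h]; rw [← ih, h]; simp

theorem sm_ne_nil (xs : List Int) (h : xs ≠ []) : sm xs ≠ [] := by
  intro hc
  have := sm_length xs
  rw [hc] at this
  exact h (List.length_eq_zero_iff.mp this.symm)

theorem sm_cons_cons (x y : Int) (ys : List Int) :
    sm (x :: y :: ys) = min x ((sm (y :: ys)).headI) :: sm (y :: ys) := by
  cases hsm : sm (y :: ys) with
  | nil => exact absurd hsm (sm_ne_nil _ (by simp))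
  | cons m ms =>
    rw [show sm (x :: y :: ys) = (match sm (y :: ys) with
        | [] => [x] | m :: ms => min x m :: m :: ms) from rfl, hsm]
    simp [List.headI]

theorem foldl_min_swap (l : List Int) : ∀ a b : Int, l.foldl min (min a b) = min a (l.foldl min b) := by
  induction l with
  | nil => intro a b; rfl
  | cons c l ih =>
    intro a b
    simp only [List.foldl_cons, min_assoc]
    exact ih a (min b c)

theorem sm_head (x : Int) (xs : List Int) :
    (sm (x :: xs)).headI = xs.foldl min x := by
  induction xs generalizing x with
  | nil => simp [sm]
  | cons y ys ih =>
    rw [sm_cons_cons, List.headI, ih y, List.foldl_cons]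
    exact (foldl_min_swap ys x y).symm

theorem getD_zero_headI (l : List Int) (h : l ≠ []) : l.getD 0 0 = l.headI := by
  cases l with
  | nil => simp at h
  | cons a l => rfl

-- sm: pointwise characterisation
theorem sm_getD_last : ∀ (nums : List Int) (h : nums ≠ []),
    (sm nums).getD (nums.length - 1) 0 = nums.getLast h := by
  intro nums
  induction nums with
  | nil => intro h; simp at h
  | cons x xs ih =>
    intro h
    cases xs with
    | nil => simp [sm]
    | cons y ys =>
      have hne : (y :: ys) ≠ [] := by simp
      rw [sm_cons_cons, List.getLast_cons hne, ← ih hne]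
      have hl : (x :: y :: ys).length - 1 = ((y :: ys).length - 1) + 1 := by simp
      rw [hl, List.getD_cons_succ]

theorem sm_getD_step : ∀ (nums : List Int) (i : Nat), i + 1 < nums.length →
    (sm nums).getD i 0 = min ((sm nums).getD (i + 1) 0) (nums.getD i 0) := by
  intro nums
  induction nums with
  | nil => intro i hi; simp at hi
  | cons x xs ih =>
    intro i hi
    cases xs with
    | nil => simp at hi
    | cons y ys =>
      cases i with
      | zero =>
        rw [sm_cons_cons]
        simp only [List.getD_cons_zero, List.getD_cons_succ]
        rw [getD_zero_headI _ (sm_ne_nil _ (by simp))]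
        exact min_comm _ _
      | succ i =>
        rw [sm_cons_cons]
        simp only [List.getD_cons_succ]
        exact ih i (by simpa using hi)

-- min over a suffix: min(nums[t:]) = (sm nums)[t]
theorem sm_getD_min? : ∀ (nums : List Int) (t : Nat), t < nums.length →
    PySem.List.min? (nums.drop t) (fun y => y) = some ((sm nums).getD t 0) := by
  intro nums
  induction nums with
  | nil => intro t ht; simp at ht
  | cons y ys ih =>
    intro t ht
    cases t with
    | zero =>
      rw [List.drop_zero, PySem.List.min?_id_cons,
          List.getD_eq_getElem _ 0 (by rw [sm_length]; simp),
          ← List.getD_eq_getElem _ 0, getD_zero_headI _ (sm_ne_nil _ (by simp)), sm_head]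
    | succ t =>
      have htl : t < ys.length := by simpa using ht
      have hys : ys ≠ [] := by intro h; subst h; simp at htl
      cases ys with
      | nil => simp at htl
      | cons z zs =>
        rw [List.drop_succ_cons, ih t htl, sm_cons_cons, List.getD_cons_succ]

-- scanl max: pointwise characterisation
theorem scanl_max_getD (x : Int) (xs : List Int) (t : Nat) (ht : t ≤ xs.length) :
    (List.scanl max x xs).getD t 0 = (xs.take t).foldl max x := by
  induction xs generalizing x t with
  | nil =>
    have : t = 0 := Nat.le_zero.mp ht
    subst this; simp [List.scanl]
  | cons y ys ih =>
    cases t with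
    | zero => simp [List.scanl]
    | succ t => simpa [List.scanl, List.foldl] using ih (max x y) t (by simpa using ht)

theorem scanl_max_step (x : Int) (xs : List Int) (j : Nat) (h1 : 1 ≤ j) (h2 : j ≤ xs.length) :
    (List.scanl max x xs).getD j 0
      = max ((List.scanl max x xs).getD (j - 1) 0) ((x :: xs).getD j 0) := by
  obtain ⟨j', rfl⟩ : ∃ j', j = j' + 1 := ⟨j - 1, by omega⟩
  have hj' : j' < xs.length := by omega
  simp only [Nat.add_sub_cancel, List.getD_cons_succ]
  rw [scanl_max_getD x xs (j' + 1) h2, scanl_max_getD x xs j' (by omega)]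
  rw [List.take_add_one, List.getElem?_eq_getElem hj']
  simp only [Option.toList_some, List.foldl_append, List.foldl_cons, List.foldl_nil]
  rw [List.getD_eq_getElem xs 0 hj']

-- max over a prefix: max(nums[:t+1]) as the scanl table entry
theorem scanl_max_max? (x : Int) (xs : List Int) (t : Nat) (ht : t ≤ xs.length) :
    PySem.List.max? ((x :: xs).take (t + 1)) (fun y => y)
      = some ((List.scanl max x xs).getD t 0) := by
  rw [List.take_succ_cons, PySem.List.max?_id_cons, scanl_max_getD x xs t ht]

-- A's pref fold builds the scanl table
theorem pref_fold_eq (x : Int) (xs : List Int) :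
    ∀ (m j : Nat) (acc : List Int), j + m = xs.length + 1 → 1 ≤ j →
      acc.length = xs.length + 1 →
      (∀ t, t < j → acc.getD t 0 = (List.scanl max x xs).getD t 0) →
      (PySem.List.pyRange (j : Int) ((xs.length : Int) + 1) 1).foldl
        (fun p i => PySem.List.pySetD p i
          (max (PySem.List.pyGetD p (i - 1) 0) (PySem.List.pyGetD (x :: xs) i 0))) acc
        = List.scanl max x xs := by
  intro m
  induction m with
  | zero =>
    intro j acc hjm hj1 hlen hagree
    rw [PySem.List.pyRange_one_eq_nil (by omega), List.foldl_nil]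
    apply List.ext_getElem
    · rw [hlen, List.length_scanl]
    · intro t h1 h2
      have ht : t < j := by omega
      have := hagree t ht
      rwa [List.getD_eq_getElem acc 0 h1, List.getD_eq_getElem _ 0 h2] at this
  | succ m ihm =>
    intro j acc hjm hj1 hlen hagree
    have hjlt : j < xs.length + 1 := by omega
    rw [PySem.List.pyRange_one_cons (by omega), List.foldl_cons]
    have hc1 : ((j : Int) - 1) = ((j - 1 : Nat) : Int) := by omega
    have hstep : (PySem.List.pySetD acc (j : Int)
        (max (PySem.List.pyGetD acc ((j : Int) - 1) 0) (PySem.List.pyGetD (x :: xs) (j : Int) 0)))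
        = acc.set j ((List.scanl max x xs).getD j 0) := by
      rw [hc1, PySem.List.pyGetD_natCast, PySem.List.pyGetD_natCast, PySem.List.pySetD_natCast]
      rw [hagree (j - 1) (by omega)]
      rw [scanl_max_step x xs j hj1 (by omega)]
    rw [hstep]
    have hcast : ((j : Int) + 1) = (((j + 1 : Nat)) : Int) := by push_cast; ring
    rw [hcast]
    apply ihm (j + 1) _ (by omega) (by omega) (by simpa using hlen)
    intro t ht
    by_cases hteq : t = j
    · subst hteq
      rw [List.getD_eq_getElem _ 0 (by simp only [List.length_set, hlen]; omega)]
      rw [List.getElem_set_self (by simp only [List.length_set, hlen]; omega)]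
    · have htj : t < j := by omega
      have h1 : t < acc.length := by omega
      rw [List.getD_eq_getElem _ 0 (by simp only [List.length_set, hlen]; omega),
          List.getElem_set_ne (by omega), ← List.getD_eq_getElem acc 0 h1]
      exact hagree t htj

-- A's suff fold builds sm
theorem suff_fold_eq (nums : List Int) (h : nums ≠ []) :
    ∀ (j : Nat) (acc : List Int), j ≤ nums.length - 1 →
      acc.length = nums.length →
      (∀ t, j ≤ t → t < nums.length → acc.getD t 0 = (sm nums).getD t 0) →
      (PySem.List.pyRange ((j : Int) - 1) (-1) (-1)).foldl
        (fun s i => PySem.List.pySetD s i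
          (min (PySem.List.pyGetD s (i + 1) 0) (PySem.List.pyGetD nums i 0))) acc
        = sm nums := by
  intro j
  induction j with
  | zero =>
    intro acc hj hlen hagree
    rw [show ((0 : Nat) : Int) - 1 = -1 from by norm_num]
    rw [PySem.List.pyRange_neg_one_eq_nil (by omega), List.foldl_nil]
    apply List.ext_getElem
    · rw [hlen, sm_length]
    · intro t h1 h2
      have := hagree t (Nat.zero_le t) (by omega)
      rwa [List.getD_eq_getElem acc 0 h1, List.getD_eq_getElem _ 0 h2] at this
  | succ j ihj =>
    intro acc hj hlen hagree
    have hn1 : 1 ≤ nums.length := by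
      cases nums with
      | nil => simp at h
      | cons a l => simp
    have hjlt : j + 1 < nums.length := by omega
    rw [show (((j + 1 : Nat)) : Int) - 1 = (j : Int) from by push_cast; ring]
    rw [PySem.List.pyRange_neg_one_cons (by omega), List.foldl_cons]
    have hstep : (PySem.List.pySetD acc (j : Int)
        (min (PySem.List.pyGetD acc ((j : Int) + 1) 0) (PySem.List.pyGetD nums (j : Int) 0)))
        = acc.set j ((sm nums).getD j 0) := by
      rw [show ((j : Int) + 1) = (((j + 1 : Nat)) : Int) from by omega]
      rw [PySem.List.pyGetD_natCast, PySem.List.pyGetD_natCast, PySem.List.pySetD_natCast]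
      rw [hagree (j + 1) (by omega) (by omega)]
      rw [sm_getD_step nums j (by omega)]
    rw [hstep]
    apply ihj _ (by omega) (by simpa using hlen)
    intro t htj htn
    by_cases hteq : t = j
    · subst hteq
      rw [List.getD_eq_getElem _ 0 (by simp only [List.length_set, hlen]; omega),
          List.getElem_set_self (by simp only [List.length_set, hlen]; omega),
          List.getD_eq_getElem _ 0 (by simp only [sm_length]; omega)]
    · have htj' : j + 1 ≤ t := by omega
      rw [List.getD_eq_getElem _ 0 (by simp only [List.length_set, hlen]; omega),
          List.getElem_set_ne (by omega), ← List.getD_eq_getElem acc 0 (by omega)]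
      exact hagree t htj' htn

-- the two scans agree: A reads the tables, B recomputes the same values from slices
theorem scan_eq (nums pref suff : List Int) (k : Int)
    (hpref : ∀ t : Nat, t < nums.length →
      PySem.List.max? (PySem.List.slice nums none (some ((t : Int) + 1))) (fun y => y)
        = some (pref.getD t 0))
    (hsuff : ∀ t : Nat, t < nums.length →
      PySem.List.min? (PySem.List.slice nums (some (t : Int)) none) (fun y => y)
        = some (suff.getD t 0)) :
    ∀ (m j : Nat), j + m = nums.length →
      aScan pref suff k (PySem.List.pyRange (j : Int) (nums.length : Int) 1)
        = bScan nums k (PySem.List.pyRange (j : Int) (nums.length : Int) 1) := by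
  intro m
  induction m with
  | zero =>
    intro j hj
    rw [PySem.List.pyRange_one_eq_nil (by omega)]
    rfl
  | succ m ih =>
    intro j hj
    have hjlt : j < nums.length := by omega
    rw [PySem.List.pyRange_one_cons (by push_cast; omega)]
    simp only [aScan, bScan]
    rw [hpref j hjlt, hsuff j hjlt]
    rw [PySem.List.pyGetD_natCast, PySem.List.pyGetD_natCast]
    dsimp only
    by_cases hc : pref.getD j 0 - suff.getD j 0 ≤ k
    · rw [if_pos hc, if_pos hc]
    · rw [if_neg hc, if_neg hc]
      rw [show ((j : Int) + 1) = (((j + 1 : Nat)) : Int) from by push_cast; ring]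
      exact ih (j + 1) (by omega)

theorem pySetD_neg_one_set (xs : List Int) (v : Int) (h : xs ≠ []) :
    PySem.List.pySetD xs (-1) v = xs.set (xs.length - 1) v := by
  have hn : 0 < xs.length := List.length_pos_iff.mpr h
  simp only [PySem.List.pySetD, PySem.List.pySet?, PySem.List.pyIdx?]
  rw [if_neg (by omega), if_pos (by omega)]
  simp

-- ===== VERDICT (by name: the statement is the Claim_ definition above) =====
theorem firstStableIndex_spec : Claim_equal_firstStableIndex := by
  intro nums k _hdom hpre
  unfold Spec_firstStableIndex
  cases nums with
  | nil => exact absurd rfl hpre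
  | cons x xs =>
    have hne : (x :: xs) ≠ [] := by simp
    have hlen : ((x :: xs).length : Int) = (xs.length : Int) + 1 := by
      push_cast [List.length_cons]; ring
    have e1 : (PySem.List.pyRange 1 (((x :: xs).length : Int)) 1).foldl
        (fun p i => PySem.List.pySetD p i
          (max (PySem.List.pyGetD p (i - 1) 0) (PySem.List.pyGetD (x :: xs) i 0)))
        (PySem.List.pySetD (List.replicate (x :: xs).length 0) 0 (PySem.List.pyGetD (x :: xs) 0 0))
        = List.scanl max x xs := by
      rw [hlen]
      exact pref_fold_eq x xs xs.length 1 _ (by omega) (by omega)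
        (by rw [PySem.List.pySetD_of_nonneg _ _ (by norm_num)]; simp)
        (by
          intro t ht
          have ht0 : t = 0 := by omega
          subst ht0
          rw [PySem.List.pyGetD_zero_cons, PySem.List.pySetD_of_nonneg _ _ (by norm_num),
              scanl_max_getD x xs 0 (Nat.zero_le _)]
          simp [List.replicate_succ])
    have hsd : PySem.List.pySetD (List.replicate (x :: xs).length 0) (-1)
          (PySem.List.pyGetD (x :: xs) (-1) 0)
        = (List.replicate (x :: xs).length (0 : Int)).set ((x :: xs).length - 1)
            ((x :: xs).getLast hne) := by
      rw [PySem.List.pyGetD_neg_one _ _ hne,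
          pySetD_neg_one_set _ _ (by simp)]
      simp
    have e2 : (PySem.List.pyRange (((x :: xs).length : Int) - 2) (-1) (-1)).foldl
        (fun s i => PySem.List.pySetD s i
          (min (PySem.List.pyGetD s (i + 1) 0) (PySem.List.pyGetD (x :: xs) i 0)))
        (PySem.List.pySetD (List.replicate (x :: xs).length 0) (-1)
          (PySem.List.pyGetD (x :: xs) (-1) 0))
        = sm (x :: xs) := by
      rw [hsd, show ((x :: xs).length : Int) - 2 = ((xs.length : Nat) : Int) - 1 from by
        rw [hlen]; ring]
      exact suff_fold_eq (x :: xs) hne xs.length _ (by simp) (by simp)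
        (by
          intro t ht1 ht2
          have ht0 : t = xs.length := by simp at ht2; omega
          subst ht0
          have hidx : (x :: xs).length - 1 = xs.length := by simp
          rw [List.getD_eq_getElem _ 0 (by simp)]
          simp only [List.length_cons, Nat.add_sub_cancel]
          rw [List.getElem_set_self (by simp), ← hidx, sm_getD_last (x :: xs) hne])
    have hpref : ∀ t : Nat, t < (x :: xs).length →
        PySem.List.max? (PySem.List.slice (x :: xs) none (some ((t : Int) + 1))) (fun y => y)
          = some ((List.scanl max x xs).getD t 0) := by
      intro t ht
      rw [show ((t : Int) + 1) = (((t + 1 : Nat)) : Int) from by push_cast; ring,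
          PySem.List.slice_to_natCast]
      exact scanl_max_max? x xs t (by simpa using Nat.lt_succ_iff.mp ht)
    have hsuff : ∀ t : Nat, t < (x :: xs).length →
        PySem.List.min? (PySem.List.slice (x :: xs) (some (t : Int)) none) (fun y => y)
          = some ((sm (x :: xs)).getD t 0) := by
      intro t ht
      rw [PySem.List.slice_from_natCast]
      exact sm_getD_min? (x :: xs) t ht
    have e4 := scan_eq (x :: xs) (List.scanl max x xs) (sm (x :: xs)) k hpref hsuff
        (x :: xs).length 0 (by omega)
    simp only [firstStableIndex, firstStableIndex_alt]
    rw [e1, e2]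
    simpa using e4
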